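-- pv_equiv track=rewrite | github.com/Mikhail-Lebedinskiy/Polykov2 | CPM/Tur_5/B_test.py | slow_main
-- ===== SOURCE A (Python) =====
-- def slow_main(number_of_fogs, heights, number_of_days, deltaes):
--     answers = []
--     for delta in deltaes:
--         for i in range(number_of_fogs):
--             heights[i] += delta
--         positive_sum = 0
--         negative_sum = 0
--
--         for height in heights:
--             if height < 0:
--                 negative_sum += -height
--             else:
--                 positive_sum += height
--         answers.append((positive_sum, negative_sum))
--     return answers.copy()
-- ===== SOURCE B (Python) =====
-- def slow_main(number_of_fogs, heights, number_of_days, deltaes):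
--     # Sort the moving prefix once; each day, one binary search on the running
--     # offset plus prefix sums gives both daily sums in O(log N).
--     # (Does not mutate `heights`, unlike the original.)
--     m = number_of_fogs if number_of_fogs > 0 else 0
--     moving = sorted(heights[:m])
--     static_pos = 0
--     static_neg = 0
--     for h in heights[m:]:
--         if h < 0:
--             static_neg += -h
--         else:
--             static_pos += h
--     prefix = [0]
--     acc = 0
--     for h in moving:
--         acc += h
--         prefix.append(acc)
--     total = acc
--     n = len(moving)
--     answers = []
--     offset = 0
--     for delta in deltaes:
--         offset += delta
--         lo, hi = 0, n
--         while lo < hi: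
--             mid = (lo + hi) // 2
--             if moving[mid] < -offset:
--                 lo = mid + 1
--             else:
--                 hi = mid
--         k = lo
--         pk = prefix[k]
--         neg = -(pk + k * offset)
--         pos = (total - pk) + (n - k) * offset
--         answers.append((pos + static_pos, neg + static_neg))
--     return answers
-- ===== Notes on version B (the rewrite author's own statement) =====
-- stated objective: faster
-- what changed: Instead of re-adding the delta to every height and rescanning all heights each day, B sorts the moving prefix once, precomputes its prefix sums, and per day binary-searches the threshold -offset to get both daily sums in O(log N); B also does not mutate heights.
import Mathlib
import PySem

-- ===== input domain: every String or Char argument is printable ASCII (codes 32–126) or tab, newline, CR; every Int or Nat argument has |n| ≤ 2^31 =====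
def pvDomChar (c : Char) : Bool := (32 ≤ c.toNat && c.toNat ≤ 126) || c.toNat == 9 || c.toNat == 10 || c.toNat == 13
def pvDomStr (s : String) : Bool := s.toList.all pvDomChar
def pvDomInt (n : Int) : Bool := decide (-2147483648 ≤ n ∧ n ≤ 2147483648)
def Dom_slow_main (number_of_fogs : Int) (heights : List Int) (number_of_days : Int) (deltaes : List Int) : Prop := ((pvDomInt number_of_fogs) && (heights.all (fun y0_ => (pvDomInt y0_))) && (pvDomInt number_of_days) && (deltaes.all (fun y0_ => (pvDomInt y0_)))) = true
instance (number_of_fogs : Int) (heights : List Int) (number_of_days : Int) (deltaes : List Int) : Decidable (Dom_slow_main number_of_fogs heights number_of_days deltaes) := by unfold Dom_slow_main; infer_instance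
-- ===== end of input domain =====

-- B replaces A's per-day rescan of all heights by a sorted moving prefix with
-- prefix sums and a per-day binary search on the running offset (asymptotically
-- faster; reported faster in a timing run). A mutates `heights` in place;
-- B does not — the equivalence proved here is about the return value only.

-- ===== PORT A =====
def slow_main (number_of_fogs : Int) (heights : List Int) (number_of_days : Int) (deltaes : List Int) : List (Int × Int) :=
  -- answers = []; for delta in deltaes: (update first number_of_fogs heights; scan all heights); return answers.copy()
  (deltaes.foldl (fun (st : List (Int × Int) × List Int) delta =>
      let hs := (PySem.List.pyRange 0 number_of_fogs 1).foldl
        (fun h i => PySem.List.pySetD h i (PySem.List.pyGetD h i 0 + delta)) st.2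
      let pn := hs.foldl (fun (p : Int × Int) height =>
        if height < 0 then (p.1, p.2 + -height) else (p.1 + height, p.2)) (0, 0)
      (st.1 ++ [(pn.1, pn.2)], hs)) ([], heights)).1

-- ===== PORT B =====
-- while lo < hi: mid = (lo+hi)//2; if moving[mid] < x: lo = mid+1 else hi = mid
def pvBisect (a : List Int) (x : Int) (lo hi : Nat) : Nat :=
  if _h : lo < hi then
    let mid := (lo + hi) / 2
    if PySem.List.pyGetD a (mid : Int) 0 < x then pvBisect a x (mid + 1) hi
    else pvBisect a x lo mid
  else lo
termination_by hi - lo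
decreasing_by all_goals omega

def slow_main_alt (number_of_fogs : Int) (heights : List Int) (number_of_days : Int) (deltaes : List Int) : List (Int × Int) :=
  let m : Nat := (max number_of_fogs 0).toNat   -- m = number_of_fogs if > 0 else 0
  let moving := PySem.List.sorted (heights.take m) (fun x => x) false   -- heights[:m] with m ≥ 0 is take m
  let sp_sn := (heights.drop m).foldl (fun (p : Int × Int) h =>
      if h < 0 then (p.1, p.2 + -h) else (p.1 + h, p.2)) (0, 0)
  let pt := moving.foldl (fun (st : List Int × Int) h => (st.1 ++ [st.2 + h], st.2 + h)) ([0], 0)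
  let total := pt.2
  let n := moving.length
  (deltaes.foldl (fun (st : List (Int × Int) × Int) delta =>
      let offset := st.2 + delta
      let k := pvBisect moving (-offset) 0 n
      let pk := PySem.List.pyGetD pt.1 (k : Int) 0
      let neg := -(pk + (k : Int) * offset)
      let pos := (total - pk) + ((n : Int) - (k : Int)) * offset
      (st.1 ++ [(pos + sp_sn.1, neg + sp_sn.2)], offset)) ([], 0)).1

-- ===== PRECONDITION & SPEC =====
-- Pre_ excludes exactly the inputs on which A raises IndexError: an update
-- pass (deltaes ≠ []) indexing past the end of heights (number_of_fogs > len).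
def Pre_slow_main (number_of_fogs : Int) (heights : List Int) (number_of_days : Int) (deltaes : List Int) : Prop :=
  number_of_fogs ≤ (heights.length : Int) ∨ deltaes = []
instance (number_of_fogs : Int) (heights : List Int) (number_of_days : Int) (deltaes : List Int) : Decidable (Pre_slow_main number_of_fogs heights number_of_days deltaes) := by unfold Pre_slow_main; infer_instance
def pvWitness_slow_main : Int × List Int × Int × List Int := (2, [1, -2], 1, [3])

def Spec_slow_main (number_of_fogs : Int) (heights : List Int) (number_of_days : Int) (deltaes : List Int) (out : List (Int × Int)) : Prop := out = slow_main_alt number_of_fogs heights number_of_days deltaes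
instance (number_of_fogs : Int) (heights : List Int) (number_of_days : Int) (deltaes : List Int) (out : List (Int × Int)) : Decidable (Spec_slow_main number_of_fogs heights number_of_days deltaes out) := by unfold Spec_slow_main; infer_instance

-- ===== CLAIM (what is proved, stated in full; the proofs are below) =====
def Claim_equal_slow_main : Prop := ∀ (number_of_fogs : Int) (heights : List Int) (number_of_days : Int) (deltaes : List Int), Dom_slow_main number_of_fogs heights number_of_days deltaes → Pre_slow_main number_of_fogs heights number_of_days deltaes → Spec_slow_main number_of_fogs heights number_of_days deltaes (slow_main number_of_fogs heights number_of_days deltaes)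

-- ===== LEMMAS AND PROOFS =====

-- named copies of the two fold bodies (definitionally equal to the ports' lambdas)
def Astep (nf : Int) : List (Int × Int) × List Int → Int → List (Int × Int) × List Int :=
  fun st delta =>
    let hs := (PySem.List.pyRange 0 nf 1).foldl
      (fun h i => PySem.List.pySetD h i (PySem.List.pyGetD h i 0 + delta)) st.2
    let pn := hs.foldl (fun (p : Int × Int) height =>
      if height < 0 then (p.1, p.2 + -height) else (p.1 + height, p.2)) (0, 0)
    (st.1 ++ [(pn.1, pn.2)], hs)

def Bstep (moving : List Int) (pt : List Int × Int) (spn : Int × Int) :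
    List (Int × Int) × Int → Int → List (Int × Int) × Int :=
  fun st delta =>
    let offset := st.2 + delta
    let k := pvBisect moving (-offset) 0 moving.length
    let pk := PySem.List.pyGetD pt.1 (k : Int) 0
    let neg := -(pk + (k : Int) * offset)
    let pos := (pt.2 - pk) + ((moving.length : Int) - (k : Int)) * offset
    (st.1 ++ [(pos + spn.1, neg + spn.2)], offset)

-- positive / negative parts of a day's height list (A's inner scan in closed form)
def psum (l : List Int) : Int := (l.map (fun h => if h < 0 then 0 else h)).sum
def nsum (l : List Int) : Int := (l.map (fun h => if h < 0 then -h else 0)).sum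

-- the common day-by-day specification both programs are reduced to
def specL (orig : List Int) (m : Nat) : Int → List Int → List (Int × Int)
  | _, [] => []
  | S, d :: t =>
    (psum ((orig.take m).map (· + (S + d))) + psum (orig.drop m),
     nsum ((orig.take m).map (· + (S + d))) + nsum (orig.drop m)) :: specL orig m (S + d) t

theorem scanPN (l : List Int) : ∀ p q : Int,
    l.foldl (fun (p : Int × Int) h => if h < 0 then (p.1, p.2 + -h) else (p.1 + h, p.2)) (p, q)
      = (p + psum l, q + nsum l) := by
  induction l with
  | nil => intro p q; simp [psum, nsum]
  | cons h t ih =>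
    intro p q
    simp only [List.foldl_cons]
    by_cases hh : h < 0 <;> simp [hh, ih, psum, nsum] <;> ring

theorem psum_append (l₁ l₂ : List Int) : psum (l₁ ++ l₂) = psum l₁ + psum l₂ := by
  simp [psum]
theorem nsum_append (l₁ l₂ : List Int) : nsum (l₁ ++ l₂) = nsum l₁ + nsum l₂ := by
  simp [nsum]
theorem psum_perm {l l' : List Int} (h : l.Perm l') : psum l = psum l' := by
  exact List.Perm.sum_eq (h.map _)
theorem nsum_perm {l l' : List Int} (h : l.Perm l') : nsum l = nsum l' := by
  exact List.Perm.sum_eq (h.map _)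

-- the update loop of A, closed form (natural index bound)
theorem updLoopNat (delta : Int) (m : Nat) (hs : List Int) (h : m ≤ hs.length) :
    (PySem.List.pyRange 0 (m : Int) 1).foldl
      (fun h i => PySem.List.pySetD h i (PySem.List.pyGetD h i 0 + delta)) hs
    = (hs.take m).map (· + delta) ++ hs.drop m := by
  induction m with
  | zero =>
    rw [show ((0 : Nat) : Int) = 0 from rfl, PySem.List.pyRange_one_eq_nil le_rfl]
    simp
  | succ m ih =>
    have hm : m ≤ hs.length := by omega
    have hml : m < hs.length := by omega
    rw [show ((m + 1 : Nat) : Int) = (m : Int) + 1 by push_cast; ring,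
      PySem.List.pyRange_one_succ_right (by positivity), List.foldl_append, ih hm]
    simp only [List.foldl_cons, List.foldl_nil]
    have hlen : ((hs.take m).map (· + delta)).length = m := by
      simp [List.length_take, Nat.min_eq_left hm]
    have hdrop : hs.drop m = hs[m] :: hs.drop (m + 1) := List.drop_eq_getElem_cons hml
    have hget : PySem.List.pyGetD ((hs.take m).map (· + delta) ++ hs.drop m) ((m : Nat) : Int) 0
        = hs[m] := by
      rw [PySem.List.pyGetD_natCast]
      rw [List.getD_eq_getElem _ _ (by simp [List.length_drop]; omega)]
      rw [List.getElem_append_right (by omega)]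
      simp only [hlen, Nat.sub_self]
      rw [List.getElem_drop]
      simp
    rw [hget, PySem.List.pySetD_natCast, List.set_append]
    rw [if_neg (by omega)]
    rw [hlen, Nat.sub_self, hdrop]
    simp only [List.set_cons_zero]
    have htk : List.take (m + 1) hs = List.take m hs ++ [hs[m]] := by
      rw [List.take_add_one, List.getElem?_eq_getElem hml]
      simp
    rw [htk, List.map_append]
    simp

theorem updLoop (delta nf : Int) (hs : List Int) (h : nf ≤ (hs.length : Int)) :
    (PySem.List.pyRange 0 nf 1).foldl
      (fun h i => PySem.List.pySetD h i (PySem.List.pyGetD h i 0 + delta)) hs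
    = (hs.take (max nf 0).toNat).map (· + delta) ++ hs.drop (max nf 0).toNat := by
  by_cases h0 : nf ≤ 0
  · rw [PySem.List.pyRange_one_eq_nil h0]
    have : (max nf 0).toNat = 0 := by omega
    simp [this]
  · have hm : (((max nf 0).toNat : Nat) : Int) = nf := by omega
    rw [show PySem.List.pyRange 0 nf 1 = PySem.List.pyRange 0 (((max nf 0).toNat : Nat) : Int) 1
      from by rw [hm]]
    exact updLoopNat delta _ hs (by omega)

-- A's outer fold produces specL
theorem A_fold (orig : List Int) (m : Nat) (hm : m ≤ orig.length) (nf : Int)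
    (hnf : (max nf 0).toNat = m) (hle : nf ≤ (orig.length : Int)) (ds : List Int) :
    ∀ (acc : List (Int × Int)) (S : Int),
      (ds.foldl (Astep nf) (acc, (orig.take m).map (· + S) ++ orig.drop m)).1
      = acc ++ specL orig m S ds := by
  induction ds with
  | nil => intro acc S; simp [specL]
  | cons d t ih =>
    intro acc S
    rw [List.foldl_cons]
    have hlenL : ((orig.take m).map (· + S) ++ orig.drop m).length = orig.length := by
      simp [List.length_take, Nat.min_eq_left hm, List.length_drop]
      omega
    have hupd := updLoop d nf ((orig.take m).map (· + S) ++ orig.drop m) (by rw [hlenL]; exact hle)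
    rw [hnf] at hupd
    have htake : (((orig.take m).map (· + S) ++ orig.drop m).take m) = (orig.take m).map (· + S) := by
      apply List.take_left'
      simp [List.length_take, Nat.min_eq_left hm]
    have hdrop : (((orig.take m).map (· + S) ++ orig.drop m).drop m) = orig.drop m := by
      apply List.drop_left'
      simp [List.length_take, Nat.min_eq_left hm]
    rw [htake, hdrop, List.map_map] at hupd
    have hfuse : ((· + d) ∘ (· + S)) = (fun x : Int => x + (S + d)) := by
      funext x; simp [Function.comp]; ring
    rw [hfuse] at hupd
    have hstep : Astep nf (acc, (orig.take m).map (· + S) ++ orig.drop m) d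
        = (acc ++ [(psum ((orig.take m).map (· + (S + d))) + psum (orig.drop m),
            nsum ((orig.take m).map (· + (S + d))) + nsum (orig.drop m))],
           (orig.take m).map (· + (S + d)) ++ orig.drop m) := by
      unfold Astep
      simp only [hupd, scanPN, zero_add, psum_append, nsum_append]
    rw [hstep, ih _ (S + d)]
    simp [specL]

-- sorted split: elements below the threshold are exactly the first countP ones
theorem sorted_countP_split (x : Int) (a : List Int) (hs : a.Pairwise (· ≤ ·)) :
    (∀ y ∈ a.take (a.countP (fun h => decide (h < x))), y < x) ∧
    (∀ y ∈ a.drop (a.countP (fun h => decide (h < x))), ¬ y < x) := by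
  induction a with
  | nil => simp
  | cons h t ih =>
    rcases List.pairwise_cons.mp hs with ⟨hhead, htail⟩
    by_cases hx : h < x
    · rw [List.countP_cons, if_pos (by simpa using hx)]
      refine ⟨?_, ?_⟩
      · intro y hy
        rw [List.take_succ_cons] at hy
        rcases List.mem_cons.mp hy with rfl | hy
        · exact hx
        · exact (ih htail).1 y hy
      · intro y hy
        rw [List.drop_succ_cons] at hy
        exact (ih htail).2 y hy
    · have hz : (h :: t).countP (fun h => decide (h < x)) = 0 := by
        rw [List.countP_eq_zero]
        intro y hy
        rcases List.mem_cons.mp hy with rfl | hy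
        · simpa using hx
        · simp only [decide_eq_true_eq]
          intro hlt
          exact hx (lt_of_le_of_lt (hhead y hy) hlt)
      rw [hz]
      refine ⟨by simp, ?_⟩
      intro y hy
      simp only [List.drop_zero] at hy
      rcases List.mem_cons.mp hy with rfl | hy
      · exact hx
      · intro hlt; exact hx (lt_of_le_of_lt (hhead y hy) hlt)

-- at lo = hi the invariant pins countP down to lo
theorem bisect_base (a : List Int) (x : Int) (lo : Nat) (hlen : lo ≤ a.length)
    (h1 : ∀ i (h : i < a.length), i < lo → a[i] < x)
    (h2 : ∀ i (h : i < a.length), lo ≤ i → ¬ a[i] < x) :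
    a.countP (fun h => decide (h < x)) = lo := by
  have hsplit : a.countP (fun h => decide (h < x))
      = (a.take lo).countP (fun h => decide (h < x)) + (a.drop lo).countP (fun h => decide (h < x)) := by
    rw [← List.countP_append, List.take_append_drop]
  have htake : (a.take lo).countP (fun h => decide (h < x)) = lo := by
    rw [List.countP_eq_length.mpr, List.length_take, Nat.min_eq_left hlen]
    intro y hy
    rcases List.mem_iff_getElem.mp hy with ⟨i, hi, rfl⟩
    have hi' : i < lo := by
      have := hi; rw [List.length_take, Nat.min_eq_left hlen] at this; exact this
    rw [List.getElem_take]
    exact decide_eq_true (h1 i (by omega) hi')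
  have hdrop : (a.drop lo).countP (fun h => decide (h < x)) = 0 := by
    rw [List.countP_eq_zero]
    intro y hy
    rcases List.mem_iff_getElem.mp hy with ⟨j, hj, rfl⟩
    rw [List.getElem_drop]
    have hlj : lo + j < a.length := by
      have := hj; rw [List.length_drop] at this; omega
    simpa using h2 (lo + j) hlj (by omega)
  omega

-- binary-search loop invariant
theorem pvBisect_inv (a : List Int) (x : Int) (hs : a.Pairwise (· ≤ ·)) :
    ∀ (fuel lo hi : Nat), hi - lo ≤ fuel → lo ≤ hi → hi ≤ a.length →
      (∀ i (h : i < a.length), i < lo → a[i] < x) →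
      (∀ i (h : i < a.length), hi ≤ i → ¬ a[i] < x) →
      pvBisect a x lo hi = a.countP (fun h => decide (h < x)) := by
  intro fuel
  induction fuel with
  | zero =>
    intro lo hi hfuel hlh hlen h1 h2
    have heq : lo = hi := by omega
    rw [pvBisect, dif_neg (by omega)]
    subst heq
    exact (bisect_base a x lo hlen h1 (by simpa using h2)).symm
  | succ fuel ih =>
    intro lo hi hfuel hlh hlen h1 h2
    rw [pvBisect]
    by_cases hlt : lo < hi
    · rw [dif_pos hlt]
      have hmid1 : lo ≤ (lo + hi) / 2 := by omega
      have hmid2 : (lo + hi) / 2 < hi := by omega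
      have hmlen : (lo + hi) / 2 < a.length := by omega
      have hpair := List.pairwise_iff_getElem.mp hs
      show (if PySem.List.pyGetD a (((lo + hi) / 2 : Nat) : Int) 0 < x
            then pvBisect a x ((lo + hi) / 2 + 1) hi else pvBisect a x lo ((lo + hi) / 2)) = _
      rw [PySem.List.pyGetD_natCast, List.getD_eq_getElem _ _ hmlen]
      by_cases hv : a[(lo + hi) / 2] < x
      · rw [if_pos hv]
        refine ih ((lo + hi) / 2 + 1) hi (by omega) (by omega) hlen ?_ h2
        intro i hilen hiub
        rcases Nat.lt_succ_iff_lt_or_eq.mp hiub with hi' | rfl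
        · exact lt_of_le_of_lt (hpair i ((lo + hi) / 2) hilen hmlen hi') hv
        · exact hv
      · rw [if_neg hv]
        refine ih lo ((lo + hi) / 2) (by omega) (by omega) (by omega) h1 ?_
        intro i hilen hige
        rcases Nat.lt_or_ge ((lo + hi) / 2) i with h' | h'
        · intro hcon
          exact hv (lt_of_le_of_lt (hpair ((lo + hi) / 2) i hmlen hilen h') hcon)
        · have : i = (lo + hi) / 2 := by omega
          subst this
          exact hv
    · rw [dif_neg hlt]
      have heq : lo = hi := by omega
      subst heq
      exact (bisect_base a x lo hlen h1 (by simpa using h2)).symm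

theorem pvBisect_spec (a : List Int) (x : Int) (hs : a.Pairwise (· ≤ ·)) :
    pvBisect a x 0 a.length = a.countP (fun h => decide (h < x)) := by
  refine pvBisect_inv a x hs (a.length) 0 a.length (by omega) (by omega) le_rfl ?_ ?_
  · intro i _ hi'; omega
  · intro i h hi'; omega

-- prefix-sum loop, closed form
theorem prefixFold (l : List Int) : ∀ (p : List Int) (acc : Int),
    l.foldl (fun (st : List Int × Int) h => (st.1 ++ [st.2 + h], st.2 + h)) (p, acc)
    = (p ++ (List.range l.length).map (fun i => acc + (l.take (i + 1)).sum), acc + l.sum) := by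
  induction l with
  | nil => intro p acc; simp
  | cons a t ih =>
    intro p acc
    simp only [List.foldl_cons, ih]
    refine Prod.ext ?_ ?_
    · show p ++ [acc + a] ++ _ = p ++ _
      simp only [List.length_cons, List.range_succ_eq_map, List.map_cons, List.map_map,
        List.append_assoc, List.singleton_append, List.take_succ_cons, List.sum_cons,
        List.take_zero, List.sum_nil]
      congr 2
      · ring
      · apply List.map_congr_left
        intro i _
        simp only [Function.comp_apply]
        ring
    · show acc + a + t.sum = acc + (a :: t).sum
      simp [List.sum_cons]; ring

-- the per-day closed forms on a list whose first k elements are < -S and rest ≥ -S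
theorem psum_map_of_all_lt (S : Int) (l : List Int) (h : ∀ y ∈ l, y + S < 0) :
    psum (l.map (· + S)) = 0 := by
  induction l with
  | nil => simp [psum]
  | cons a t ih =>
    have ha := h a (by simp)
    simp only [List.map_cons, psum, List.sum_cons] at *
    rw [if_pos ha]
    simpa using ih (fun y hy => h y (by simp [hy]))
theorem nsum_map_of_all_lt (S : Int) (l : List Int) (h : ∀ y ∈ l, y + S < 0) :
    nsum (l.map (· + S)) = -(l.sum + (l.length : Int) * S) := by
  induction l with
  | nil => simp [nsum]
  | cons a t ih =>
    have ha := h a (by simp)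
    simp only [List.map_cons, nsum, List.sum_cons] at *
    rw [if_pos ha, ih (fun y hy => h y (by simp [hy]))]
    simp only [List.length_cons]
    push_cast
    ring
theorem psum_map_of_all_ge (S : Int) (l : List Int) (h : ∀ y ∈ l, ¬ y + S < 0) :
    psum (l.map (· + S)) = l.sum + (l.length : Int) * S := by
  induction l with
  | nil => simp [psum]
  | cons a t ih =>
    have ha := h a (by simp)
    simp only [List.map_cons, psum, List.sum_cons] at *
    rw [if_neg ha, ih (fun y hy => h y (by simp [hy]))]
    simp only [List.length_cons]
    push_cast
    ring
theorem nsum_map_of_all_ge (S : Int) (l : List Int) (h : ∀ y ∈ l, ¬ y + S < 0) :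
    nsum (l.map (· + S)) = 0 := by
  induction l with
  | nil => simp [nsum]
  | cons a t ih =>
    have ha := h a (by simp)
    simp only [List.map_cons, nsum, List.sum_cons] at *
    rw [if_neg ha]
    simpa using ih (fun y hy => h y (by simp [hy]))

-- one day on the sorted moving list: B's arithmetic equals psum/nsum of the shifted list
theorem day_eq (a : List Int) (hs : a.Pairwise (· ≤ ·)) (S : Int) :
    ((a.sum - (a.take (a.countP (fun h => decide (h < -S)))).sum)
        + ((a.length : Int) - (a.countP (fun h => decide (h < -S)) : Int)) * S
      = psum (a.map (· + S)))
    ∧ (-((a.take (a.countP (fun h => decide (h < -S)))).sum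
          + (a.countP (fun h => decide (h < -S)) : Int) * S)
      = nsum (a.map (· + S))) := by
  have hk : a.countP (fun h => decide (h < -S)) ≤ a.length := List.countP_le_length
  obtain ⟨htk, hdr⟩ := sorted_countP_split (-S) a hs
  set k := a.countP (fun h => decide (h < -S)) with hkdef
  have hsplit : a.map (· + S) = (a.take k).map (· + S) ++ (a.drop k).map (· + S) := by
    rw [← List.map_append, List.take_append_drop]
  have hlt : ∀ y ∈ a.take k, y + S < 0 := fun y hy => by have := htk y hy; omega
  have hge : ∀ y ∈ a.drop k, ¬ y + S < 0 := fun y hy => by have := hdr y hy; omega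
  have hlentk : ((a.take k).length : Int) = (k : Int) := by
    rw [List.length_take, Nat.min_eq_left hk]
  have hlendr : ((a.drop k).length : Int) = (a.length : Int) - (k : Int) := by
    rw [List.length_drop]; omega
  have hsum : a.sum = (a.take k).sum + (a.drop k).sum := by
    rw [← List.sum_append, List.take_append_drop]
  constructor
  · rw [hsplit, psum_append, psum_map_of_all_lt S _ hlt, psum_map_of_all_ge S _ hge,
      hlendr, hsum]
    ring
  · rw [hsplit, nsum_append, nsum_map_of_all_lt S _ hlt, nsum_map_of_all_ge S _ hge,
      hlentk]
    ring

-- reading the prefix-sum list at k ≤ n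
theorem prefix_get (M : List Int) (k : Nat) (hk : k ≤ M.length) :
    PySem.List.pyGetD ([0] ++ (List.range M.length).map (fun i => 0 + (M.take (i + 1)).sum))
      ((k : Nat) : Int) 0 = (M.take k).sum := by
  rw [PySem.List.pyGetD_natCast]
  cases k with
  | zero => simp
  | succ j =>
    have hj : j < M.length := by omega
    rw [List.getD_eq_getElem _ _ (by simp; omega)]
    rw [List.getElem_append_right (by simp)]
    simp [hj]

-- B's outer fold produces specL too
theorem B_fold (orig : List Int) (m : Nat) (ds : List Int) :
    ∀ (acc : List (Int × Int)) (S : Int),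
      (ds.foldl (Bstep (PySem.List.sorted (orig.take m) (fun x => x) false)
          ((PySem.List.sorted (orig.take m) (fun x => x) false).foldl
            (fun (st : List Int × Int) h => (st.1 ++ [st.2 + h], st.2 + h)) ([0], 0))
          (psum (orig.drop m), nsum (orig.drop m))) (acc, S)).1
      = acc ++ specL orig m S ds := by
  induction ds with
  | nil => intro acc S; simp [specL]
  | cons d t ih =>
    intro acc S
    rw [List.foldl_cons]
    have hpair : (PySem.List.sorted (orig.take m) (fun x => x) false).Pairwise (· ≤ ·) := by
      simpa using PySem.List.sorted_pairwise (orig.take m) (fun x => x)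
    set M := PySem.List.sorted (orig.take m) (fun x => x) false with hM
    have hperm : M.Perm (orig.take m) := PySem.List.sorted_perm _ _ _
    have hk : M.countP (fun h => decide (h < -(S + d))) ≤ M.length := List.countP_le_length
    have hday := day_eq M hpair (S + d)
    have hstep : Bstep M
        (M.foldl (fun (st : List Int × Int) h => (st.1 ++ [st.2 + h], st.2 + h)) ([0], 0))
        (psum (orig.drop m), nsum (orig.drop m)) (acc, S) d
        = (acc ++ [(psum ((orig.take m).map (· + (S + d))) + psum (orig.drop m),
            nsum ((orig.take m).map (· + (S + d))) + nsum (orig.drop m))], S + d) := by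
      unfold Bstep
      simp only [prefixFold]
      rw [pvBisect_spec M (-(S + d)) hpair]
      rw [prefix_get M _ hk]
      have hps : psum (M.map (· + (S + d))) = psum ((orig.take m).map (· + (S + d))) :=
        psum_perm (hperm.map _)
      have hns : nsum (M.map (· + (S + d))) = nsum ((orig.take m).map (· + (S + d))) :=
        nsum_perm (hperm.map _)
      simp only [zero_add]
      rw [hday.1, hday.2, hps, hns]
    rw [hstep, ih _ (S + d)]
    simp [specL]

-- ===== VERDICT (by name: the statement is the Claim_ definition above) =====
theorem slow_main_spec : Claim_equal_slow_main := by
  intro nf hs nd ds _ hpre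
  unfold Spec_slow_main
  have hA0 : slow_main nf hs nd ds = (ds.foldl (Astep nf) ([], hs)).1 := rfl
  have hB0 : slow_main_alt nf hs nd ds
      = (ds.foldl (Bstep (PySem.List.sorted (hs.take (max nf 0).toNat) (fun x => x) false)
          ((PySem.List.sorted (hs.take (max nf 0).toNat) (fun x => x) false).foldl
            (fun (st : List Int × Int) h => (st.1 ++ [st.2 + h], st.2 + h)) ([0], 0))
          ((hs.drop (max nf 0).toNat).foldl (fun (p : Int × Int) h =>
            if h < 0 then (p.1, p.2 + -h) else (p.1 + h, p.2)) (0, 0))) ([], 0)).1 := rfl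
  rcases hpre with hle | rfl
  · have hm : ((max nf 0).toNat : Nat) ≤ hs.length := by omega
    rw [hA0, hB0, scanPN, zero_add, zero_add]
    have hinit : (hs.take ((max nf 0).toNat)).map (· + (0 : Int)) ++ hs.drop ((max nf 0).toNat)
        = hs := by simp
    calc (ds.foldl (Astep nf) ([], hs)).1
        = (ds.foldl (Astep nf) ([], (hs.take ((max nf 0).toNat)).map (· + (0 : Int))
            ++ hs.drop ((max nf 0).toNat))).1 := by rw [hinit]
      _ = [] ++ specL hs ((max nf 0).toNat) 0 ds := A_fold hs _ hm nf rfl hle ds [] 0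
      _ = _ := by rw [B_fold hs ((max nf 0).toNat) ds [] 0]
  · simp [hA0, hB0]
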